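-- pv_equiv track=rewrite | github.com/varunmax7/CareCallerAI | edge_case_handler.py | validate_response_safety
-- ===== SOURCE A (Python) =====
-- def validate_response_safety(response: str) -> bool:
--     """Validate that response doesn't contain prohibited content"""
--     prohibited = [
--         "medical advice",
--         "should take",
--         "recommend",
--         "prescribe",
--         "diagnose"
--     ]
--
--     response_lower = response.lower()
--     for prohibited_word in prohibited:
--         if prohibited_word in response_lower:
--             return False
--     return True
-- ===== SOURCE B (Python) =====
-- def validate_response_safety(response: str) -> bool:
--     """Validate that response doesn't contain prohibited content.
--
--     Single left-to-right scan: at each position, try to match any prohibited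
--     phrase character-by-character (case-insensitively), instead of lowering
--     the whole string and running five separate substring searches.
--     """
--     prohibited = [
--         "medical advice",
--         "should take",
--         "recommend",
--         "prescribe",
--         "diagnose"
--     ]
--     n = len(response)
--     for i in range(n):
--         for p in prohibited:
--             if i + len(p) <= n and all(response[i + j].lower() == p[j] for j in range(len(p))):
--                 return False
--     return True
-- ===== Notes on version B (the rewrite author's own statement) =====
-- stated objective: alternative
-- what changed: Replaces lowercasing the whole string followed by five independent substring-containment scans with a single left-to-right scan that tries to match each phrase character-by-character (case-insensitively) at every position.
import Mathlib
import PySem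

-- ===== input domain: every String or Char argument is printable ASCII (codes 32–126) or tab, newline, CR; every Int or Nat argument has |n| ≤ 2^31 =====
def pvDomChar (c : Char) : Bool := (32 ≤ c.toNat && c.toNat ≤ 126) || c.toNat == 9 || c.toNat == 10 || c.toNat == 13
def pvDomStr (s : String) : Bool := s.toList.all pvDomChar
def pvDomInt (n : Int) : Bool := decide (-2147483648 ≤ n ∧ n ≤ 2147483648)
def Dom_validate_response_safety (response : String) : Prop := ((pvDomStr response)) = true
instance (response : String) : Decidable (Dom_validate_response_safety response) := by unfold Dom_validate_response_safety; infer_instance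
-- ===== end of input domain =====

-- B replaces "lower the whole string, then five independent substring scans" with one
-- left-to-right scan matching every phrase character-by-character (case-insensitively);
-- objective: alternative (same cost, genuinely different traversal).

-- the shared literal list of prohibited phrases (a module constant in both programs)
def pvProhibited : List (List Char) :=
  ["medical advice".toList, "should take".toList, "recommend".toList,
   "prescribe".toList, "diagnose".toList]

-- ===== PORT A =====
-- the for-loop over the prohibited list with early return False
def pvCheckLoop : List (List Char) → List Char → Bool
  | [], _ => true
  | w :: rest, rl => if PySem.Chars.isIn w rl then false else pvCheckLoop rest rl

def validate_response_safety (response : String) : Bool :=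
  pvCheckLoop pvProhibited (PySem.Chars.lower response.toList)

-- ===== PORT B =====
-- Source B's inner bound-checked char-by-char comparison `all(response[i+j].lower() == p[j] …)`
def pvMatchAt : List Char → List Char → Bool
  | [], _ => true
  | _ :: _, [] => false
  | c :: ps, d :: ss => (PySem.Chars.lowerChar d == c) && pvMatchAt ps ss

-- Source B's outer loop `for i in range(n)`: structural recursion over the remaining suffix
def pvScan : List Char → Bool
  | [] => true
  | d :: ss => if pvProhibited.any (fun p => pvMatchAt p (d :: ss)) then false else pvScan ss

def validate_response_safety_alt (response : String) : Bool :=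
  pvScan response.toList

-- ===== PRECONDITION & SPEC =====
def Spec_validate_response_safety (response : String) (out : Bool) : Prop := out = validate_response_safety_alt response
instance (response : String) (out : Bool) : Decidable (Spec_validate_response_safety response out) := by unfold Spec_validate_response_safety; infer_instance

-- ===== CLAIM (what is proved, stated in full; the proofs are below) =====
def Claim_equal_validate_response_safety : Prop := ∀ (response : String), Dom_validate_response_safety response → Spec_validate_response_safety response (validate_response_safety response)

-- ===== LEMMAS AND PROOFS =====

theorem pvLower_cons (d : Char) (ss : List Char) :
    PySem.Chars.lower (d :: ss) = PySem.Chars.lowerChar d :: PySem.Chars.lower ss := by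
  simp [PySem.Chars.lower]

theorem pvMatchAt_iff (p s : List Char) :
    pvMatchAt p s = true ↔ p <+: PySem.Chars.lower s := by
  induction p generalizing s with
  | nil => simp [pvMatchAt]
  | cons c ps ih =>
    cases s with
    | nil => simp [pvMatchAt, PySem.Chars.lower]
    | cons d ss =>
      rw [pvLower_cons]
      simp [pvMatchAt, ih, List.cons_prefix_cons]
      tauto

set_option maxRecDepth 4096 in
theorem pvProhibited_not_infix_nil : ∀ p ∈ pvProhibited, ¬ p <:+: PySem.Chars.lower [] := by
  decide

theorem pvScan_iff (s : List Char) :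
    pvScan s = true ↔ ∀ p ∈ pvProhibited, ¬ p <:+: PySem.Chars.lower s := by
  induction s with
  | nil =>
    simp only [pvScan, true_iff]
    exact pvProhibited_not_infix_nil
  | cons d ss ih =>
    rw [pvScan]
    by_cases h : pvProhibited.any (fun p => pvMatchAt p (d :: ss)) = true
    · rw [if_pos h]
      rcases List.any_eq_true.mp h with ⟨p, hp, hm⟩
      exact iff_of_false (by simp) (fun hall => hall p hp (List.infix_cons_iff.mpr (Or.inl
        (by simpa [pvLower_cons] using (pvMatchAt_iff p (d :: ss)).mp hm))))
    · rw [if_neg h, ih]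
      constructor
      · intro hall p hp
        rw [pvLower_cons, List.infix_cons_iff]
        rintro (hpre | hinf)
        · exact h (List.any_eq_true.mpr ⟨p, hp, (pvMatchAt_iff p (d :: ss)).mpr
            (by simpa [pvLower_cons] using hpre)⟩)
        · exact hall p hp hinf
      · intro hall p hp hinf
        exact hall p hp (List.infix_cons_iff.mpr (Or.inr (by
          simpa [pvLower_cons] using hinf)))

theorem pvCheckLoop_iff (ws : List (List Char)) (rl : List Char) :
    pvCheckLoop ws rl = true ↔ ∀ p ∈ ws, ¬ p <:+: rl := by
  induction ws with
  | nil => simp [pvCheckLoop]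
  | cons w rest ih =>
    rw [pvCheckLoop]
    by_cases h : PySem.Chars.isIn w rl = true
    · rw [if_pos h]
      exact iff_of_false (by simp)
        (fun hall => hall w (by simp) ((PySem.Chars.isIn_iff_infix w rl).mp h))
    · rw [if_neg h, ih]
      constructor
      · intro hall p hp
        rcases List.mem_cons.mp hp with rfl | hp
        · exact fun hinf => h ((PySem.Chars.isIn_iff_infix p rl).mpr hinf)
        · exact hall p hp
      · intro hall p hp
        exact hall p (List.mem_cons_of_mem _ hp)

-- ===== VERDICT (by name: the statement is the Claim_ definition above) =====
theorem validate_response_safety_spec : Claim_equal_validate_response_safety := by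
  intro response _
  unfold Spec_validate_response_safety validate_response_safety validate_response_safety_alt
  rw [Bool.eq_iff_iff, pvCheckLoop_iff, pvScan_iff]
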